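-- pv_equiv track=rewrite | github.com/Toralis-Labs/Aortic-Dynamics-Model | oldcodes/orientnew.py | _collect_component_nodes_excluding_scaffold
-- ===== SOURCE A (Python) =====
-- from typing import TYPE_CHECKING, Any, Dict, List, Optional, Tuple
--
-- def _collect_component_nodes_excluding_scaffold(
--     adjacency: Dict[int, Dict[int, float]],
--     start_node: int,
--     scaffold_set: set[int],
-- ) -> set[int]:
--     start = int(start_node)
--     if start in scaffold_set:
--         return set()
--
--     stack = [start]
--     component: set[int] = set()
--     while stack:
--         node = int(stack.pop())
--         if node in component or node in scaffold_set:
--             continue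
--         component.add(node)
--         for nbr in adjacency.get(node, {}).keys():
--             nbr_i = int(nbr)
--             if nbr_i not in component and nbr_i not in scaffold_set:
--                 stack.append(nbr_i)
--     return component
-- ===== SOURCE B (Python) =====
-- def _collect_component_nodes_excluding_scaffold(adjacency, start_node, scaffold_set):
--     component: set[int] = set()
--     frontier = {int(start_node)}
--     while frontier:
--         fresh = {n for n in frontier if n not in scaffold_set and n not in component}
--         component |= fresh
--         frontier = {int(nbr) for node in fresh for nbr in adjacency.get(node, {})}
--     return component
-- ===== Notes on version B (the rewrite author's own statement) =====
-- stated objective: alternative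
-- what changed: Replaces A's one-node-at-a-time explicit-stack DFS (pop a node, check, push its unseen neighbours) by a level-by-level frontier expansion in set algebra: filter the frontier against scaffold/collected, union it into the component, and rebuild the frontier as the neighbours of the freshly added nodes.
import Mathlib
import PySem

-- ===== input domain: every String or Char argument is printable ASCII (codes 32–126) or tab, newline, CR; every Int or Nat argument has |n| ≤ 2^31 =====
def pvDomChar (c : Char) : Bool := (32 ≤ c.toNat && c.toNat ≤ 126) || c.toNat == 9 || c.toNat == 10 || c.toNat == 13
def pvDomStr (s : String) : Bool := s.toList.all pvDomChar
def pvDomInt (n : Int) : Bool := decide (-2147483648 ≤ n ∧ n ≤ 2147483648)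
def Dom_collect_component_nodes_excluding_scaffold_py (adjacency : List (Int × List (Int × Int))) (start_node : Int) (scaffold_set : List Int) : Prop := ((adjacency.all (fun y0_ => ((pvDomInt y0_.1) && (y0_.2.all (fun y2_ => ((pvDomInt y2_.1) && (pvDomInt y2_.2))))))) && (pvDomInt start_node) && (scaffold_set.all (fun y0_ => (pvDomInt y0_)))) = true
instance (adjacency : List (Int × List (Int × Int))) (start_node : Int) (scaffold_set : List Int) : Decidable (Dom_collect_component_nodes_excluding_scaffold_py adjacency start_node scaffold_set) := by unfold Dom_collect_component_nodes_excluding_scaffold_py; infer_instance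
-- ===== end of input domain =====

-- B replaces A's one-node-at-a-time explicit stack DFS by a level-by-level frontier expansion
-- with set algebra (objective: alternative, same asymptotic cost).  The Python function returns a
-- set (iteration order unobservable); both ports return that set canonically in strictly
-- ascending order, which is exact as a finite set.

-- shared lookup helper: int keys of adjacency.get(node, {}) (both Pythons read neighbours this way)
def pvNbrs (adjacency : List (Int × List (Int × Int))) (node : Int) : List Int :=
  (PySem.Dict.mk ((PySem.Dict.mk adjacency).getD node [])).keys

-- a finite universe containing every node either loop can ever reach from start (used for termination)
def pvUniv (adjacency : List (Int × List (Int × Int))) (start : Int) : List Int :=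
  start :: adjacency.flatMap (fun p => p.2.map (fun q => q.1))

-- rewriting lemmas for pvNbrs (cited by pvNbrs_subset)
theorem pvNbrs_nil (n : Int) : pvNbrs [] n = [] := rfl

theorem pvNbrs_cons_hit (n k : Int) (v : List (Int × Int)) (tl : List (Int × List (Int × Int)))
    (hk : (k == n) = true) : pvNbrs ((k, v) :: tl) n = v.map (fun q => q.1) := by
  simp [pvNbrs, PySem.Dict.getD, PySem.Dict.get?_mk_cons, hk, PySem.Dict.keys]

theorem pvNbrs_cons_miss (n k : Int) (v : List (Int × Int)) (tl : List (Int × List (Int × Int)))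
    (hk : ¬ (k == n) = true) : pvNbrs ((k, v) :: tl) n = pvNbrs tl n := by
  simp [pvNbrs, PySem.Dict.getD, PySem.Dict.get?_mk_cons, hk]

-- termination lemma: neighbours live in the universe (cited by both loops' proofs)
theorem pvNbrs_subset (adjacency : List (Int × List (Int × Int))) (start n m : Int)
    (h : m ∈ pvNbrs adjacency n) : m ∈ pvUniv adjacency start := by
  have key : ∀ (l : List (Int × List (Int × Int))),
      m ∈ pvNbrs l n → m ∈ l.flatMap (fun p => p.2.map (fun q => q.1)) := by
    intro l
    induction l with
    | nil => intro h'; rw [pvNbrs_nil] at h'; cases h'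
    | cons hd tl ih =>
        intro h'
        rcases hd with ⟨k, v⟩
        by_cases hk : (k == n) = true
        · rw [pvNbrs_cons_hit n k v tl hk] at h'
          exact List.mem_flatMap.mpr ⟨(k, v), List.mem_cons_self, h'⟩
        · rw [pvNbrs_cons_miss n k v tl hk] at h'
          rw [List.flatMap_cons]
          exact List.mem_append.mpr (Or.inr (ih h'))
  exact List.mem_cons_of_mem _ (key adjacency h)

-- termination lemma: a nodup subset of the universe is no longer than it
theorem pvNodupLen (univ comp : List Int) (hn : comp.Nodup) (hsub : ∀ x ∈ comp, x ∈ univ) :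
    comp.length ≤ univ.length :=
  (hn.subperm (fun x hx => hsub x hx)).length_le

-- membership of the inner push loop of A (cited by the loop's proofs)
theorem pvMemFoldlCons (p : Int → Bool) (l st : List Int) (x : Int) :
    x ∈ l.foldl (fun st m => if p m then m :: st else st) st ↔ x ∈ st ∨ (x ∈ l ∧ p x = true) := by
  induction l generalizing st with
  | nil => simp
  | cons a t ih =>
      simp only [List.foldl_cons]
      by_cases hp : p a = true
      · rw [if_pos hp, ih]
        constructor
        · rintro (h | h)
          · rcases List.mem_cons.mp h with rfl | h
            · exact Or.inr ⟨List.mem_cons_self, hp⟩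
            · exact Or.inl h
          · exact Or.inr ⟨List.mem_cons_of_mem _ h.1, h.2⟩
        · rintro (h | ⟨hm, hx⟩)
          · exact Or.inl (List.mem_cons_of_mem _ h)
          · rcases List.mem_cons.mp hm with rfl | hm
            · exact Or.inl List.mem_cons_self
            · exact Or.inr ⟨hm, hx⟩
      · rw [if_neg hp, ih]
        constructor
        · rintro (h | h)
          · exact Or.inl h
          · exact Or.inr ⟨List.mem_cons_of_mem _ h.1, h.2⟩
        · rintro (h | ⟨hm, hx⟩)
          · exact Or.inl h
          · rcases List.mem_cons.mp hm with rfl | hm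
            · exact absurd hx hp
            · exact Or.inr ⟨hm, hx⟩

-- Set.add of a missing element is an append (cited by A's termination proof)
theorem pvAddLen (s : PySem.Set Int) (x : Int) (hx : s.contains x = false) :
    (PySem.Set.add s x).length = s.length + 1 := by
  have hx' : x ∉ s := by simpa [PySem.Set.contains] using hx
  simp [PySem.Set.add, PySem.Set.contains, hx']

theorem pvNodupAdd (s : PySem.Set Int) (x : Int) (hn : s.Nodup) : (PySem.Set.add s x).Nodup := by
  unfold PySem.Set.add
  by_cases hx : s.contains x = true
  · rw [if_pos hx]; exact hn
  · rw [if_neg hx]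
    have hxm : x ∉ s := fun hm => hx (by simpa [PySem.Set.contains] using List.elem_eq_true_of_mem hm)
    exact List.Nodup.append hn (List.nodup_singleton x)
      (fun a ha hb => hxm ((List.mem_singleton.mp hb) ▸ ha))

-- Set.union appends the genuinely new elements (cited by B's termination proof)
theorem pvUnionAppend (s t : List Int) :
    ∃ e : List Int, PySem.Set.union s t = s ++ e ∧ (∀ y ∈ e, y ∈ t) ∧
      (∀ y ∈ t, PySem.Set.contains s y = false → y ∈ e) := by
  have key : ∀ (t s : List Int), ∃ e, t.foldl PySem.Set.add s = s ++ e ∧ (∀ y ∈ e, y ∈ t) ∧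
      (∀ y ∈ t, PySem.Set.contains s y = false → y ∈ e) := by
    intro t
    induction t with
    | nil => intro s; exact ⟨[], by simp⟩
    | cons a u ih =>
        intro s
        by_cases ha : PySem.Set.contains s a = true
        · rcases ih s with ⟨e, he, hmem, hnew⟩
          refine ⟨e, by
              simp only [List.foldl_cons]
              rw [show PySem.Set.add s a = s from by unfold PySem.Set.add; rw [if_pos ha]]
              exact he,
            fun y hy => List.mem_cons_of_mem _ (hmem y hy), ?_⟩
          intro y hy hys
          rcases List.mem_cons.mp hy with rfl | hy
          · rw [ha] at hys; cases hys
          · exact hnew y hy hys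
        · rcases ih (s ++ [a]) with ⟨e, he, hmem, hnew⟩
          refine ⟨a :: e, ?_, ?_, ?_⟩
          · simp only [List.foldl_cons]
            rw [show PySem.Set.add s a = s ++ [a] from by unfold PySem.Set.add; rw [if_neg ha]]
            rw [he]; simp
          · intro y hy
            rcases List.mem_cons.mp hy with rfl | hy
            · exact List.mem_cons_self
            · exact List.mem_cons_of_mem _ (hmem y hy)
          · intro y hy hys
            rcases List.mem_cons.mp hy with rfl | hy
            · exact List.mem_cons_self
            · by_cases hys' : PySem.Set.contains (s ++ [a]) y = true
              · have : y = a := by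
                  have hm : y ∈ s ++ [a] := by
                    simpa [PySem.Set.contains] using hys'
                  rcases List.mem_append.mp hm with hm | hm
                  · exfalso
                    have hc : PySem.Set.contains s y = true := by
                      simpa [PySem.Set.contains] using List.elem_eq_true_of_mem hm
                    rw [hys] at hc
                    cases hc
                  · simpa using hm
                exact this ▸ List.mem_cons_self
              · exact List.mem_cons_of_mem _ (hnew y hy (by simpa using hys'))
  rcases key t s with ⟨e, he, hmem, hnew⟩
  exact ⟨e, by simpa [PySem.Set.union, PySem.Set.update] using he, hmem, hnew⟩

-- Set.union of a nodup set stays nodup (cited by B's loop)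
theorem pvNodupUnion (s t : List Int) (hn : s.Nodup) : (PySem.Set.union s t).Nodup := by
  have key : ∀ (t s : List Int), s.Nodup → (t.foldl PySem.Set.add s).Nodup := by
    intro t
    induction t with
    | nil => intro s h; exact h
    | cons a u ih => intro s h; exact ih _ (pvNodupAdd s a h)
  simpa [PySem.Set.union, PySem.Set.update] using key t s hn

-- ===== PORT A =====
-- A: explicit stack, pop one node, skip if seen or scaffold, add, push its unseen non-scaffold
-- neighbours.  The hypothesis arguments only justify termination.
def pvDfsLoop (adjacency : List (Int × List (Int × Int))) (scaffold_set : List Int) (start : Int)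
    (stack : List Int) (component : PySem.Set Int)
    (hstack : ∀ x ∈ stack, x ∈ pvUniv adjacency start)
    (hcomp : component.Nodup ∧ ∀ x ∈ component, x ∈ pvUniv adjacency start) : List Int :=
  match stack with
  | [] => component
  | node :: rest =>
    if PySem.Set.contains component node || scaffold_set.contains node then
      pvDfsLoop adjacency scaffold_set start rest component
        (fun x hx => hstack x (List.mem_cons_of_mem _ hx)) hcomp
    else
      pvDfsLoop adjacency scaffold_set start
        ((pvNbrs adjacency node).foldl
          (fun st m =>
            if !(PySem.Set.contains (PySem.Set.add component node) m) && !(scaffold_set.contains m)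
            then m :: st else st) rest)
        (PySem.Set.add component node)
        (by
          intro x hx
          rcases (pvMemFoldlCons _ _ _ _).mp hx with h | ⟨h, _⟩
          · exact hstack x (List.mem_cons_of_mem _ h)
          · exact pvNbrs_subset adjacency start node x h)
        ⟨pvNodupAdd _ _ hcomp.1, by
          intro x hx
          rcases (PySem.Set.mem_add _ _ _).mp hx with h | rfl
          · exact hcomp.2 x h
          · exact hstack x List.mem_cons_self⟩
  termination_by ((pvUniv adjacency start).length + 1 - component.length, stack.length)
  decreasing_by
  · exact Prod.Lex.right _ (by simp)
  · apply Prod.Lex.left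
    have hco : PySem.Set.contains component node = false := by
      rcases Bool.or_eq_false_iff.mp (Bool.of_not_eq_true (by assumption)) with ⟨h1, _⟩
      exact h1
    have hlen := pvAddLen component node hco
    have hle := pvNodupLen (pvUniv adjacency start) component hcomp.1 hcomp.2
    omega

def collect_component_nodes_excluding_scaffold_py (adjacency : List (Int × List (Int × Int))) (start_node : Int) (scaffold_set : List Int) : List Int :=
  if scaffold_set.contains start_node then []
  else
    PySem.List.sorted
      (pvDfsLoop adjacency scaffold_set start_node [start_node] []
        (by intro x hx; rcases List.mem_cons.mp hx with rfl | h
            · exact List.mem_cons_self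
            · cases h)
        ⟨List.nodup_nil, by intro x hx; cases hx⟩)
      (fun x => x) false

-- ===== PORT B =====
-- B: level-by-level frontier expansion; drop scaffold/already-collected nodes, union the rest in,
-- expand to the next frontier of neighbours.  Hypothesis arguments only justify termination.
def pvBfsLoop (adjacency : List (Int × List (Int × Int))) (scaffold_set : List Int) (start : Int)
    (frontier : PySem.Set Int) (component : PySem.Set Int)
    (hfront : ∀ x ∈ frontier, x ∈ pvUniv adjacency start)
    (hcomp : component.Nodup ∧ ∀ x ∈ component, x ∈ pvUniv adjacency start) : List Int :=
  if hne : frontier = [] then component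
  else
    pvBfsLoop adjacency scaffold_set start
      (PySem.Set.ofList
        ((frontier.filter
            (fun n => !(scaffold_set.contains n) && !(PySem.Set.contains component n))).flatMap
          (fun node => pvNbrs adjacency node)))
      (PySem.Set.union component
        (PySem.Set.ofList
          (frontier.filter
            (fun n => !(scaffold_set.contains n) && !(PySem.Set.contains component n)))))
      (by
        intro x hx
        rcases List.mem_flatMap.mp ((PySem.Set.mem_ofList _ _).mp hx) with ⟨node, _, hm⟩
        exact pvNbrs_subset adjacency start node x hm)
      ⟨pvNodupUnion _ _ hcomp.1, by
        intro x hx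
        rcases (PySem.Set.mem_union _ _ _).mp hx with h | h
        · exact hcomp.2 x h
        · exact hfront x (List.mem_of_mem_filter ((PySem.Set.mem_ofList _ _).mp h))⟩
  termination_by ((pvUniv adjacency start).length + 1 - component.length, frontier.length)
  decreasing_by
    by_cases hF : frontier.filter
        (fun n => !(scaffold_set.contains n) && !(PySem.Set.contains component n)) = []
    · rw [hF]
      exact Prod.Lex.right _ (by simpa using List.length_pos_iff.mpr hne)
    · apply Prod.Lex.left
      obtain ⟨x, hxF⟩ := List.exists_mem_of_ne_nil _ hF
      have hxfresh : x ∈ PySem.Set.ofList (frontier.filter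
          (fun n => !(scaffold_set.contains n) && !(PySem.Set.contains component n))) :=
        (PySem.Set.mem_ofList _ _).mpr hxF
      have hxc : PySem.Set.contains component x = false := by
        have hp := List.of_mem_filter hxF
        simp only [Bool.and_eq_true, Bool.not_eq_true'] at hp
        exact hp.2
      obtain ⟨e, heq, hmem, hnew⟩ := pvUnionAppend component
        (PySem.Set.ofList (frontier.filter
          (fun n => !(scaffold_set.contains n) && !(PySem.Set.contains component n))))
      have hxe := hnew x hxfresh hxc
      have hlen : component.length <
          (PySem.Set.union component
            (PySem.Set.ofList (frontier.filter
              (fun n => !(scaffold_set.contains n) && !(PySem.Set.contains component n))))).length := by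
        rw [heq, List.length_append]
        have := List.length_pos_iff.mpr (List.ne_nil_of_mem hxe)
        omega
      have hsub : ∀ y ∈ PySem.Set.union component
          (PySem.Set.ofList (frontier.filter
            (fun n => !(scaffold_set.contains n) && !(PySem.Set.contains component n)))),
          y ∈ pvUniv adjacency start := by
        intro y hy
        rcases (PySem.Set.mem_union _ _ _).mp hy with h | h
        · exact hcomp.2 y h
        · exact hfront y (List.mem_of_mem_filter ((PySem.Set.mem_ofList _ _).mp h))
      have hle := pvNodupLen (pvUniv adjacency start) _ (pvNodupUnion _ _ hcomp.1) hsub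
      omega

def collect_component_nodes_excluding_scaffold_py_alt (adjacency : List (Int × List (Int × Int))) (start_node : Int) (scaffold_set : List Int) : List Int :=
  PySem.List.sorted
    (pvBfsLoop adjacency scaffold_set start_node [start_node] []
      (by intro x hx; rcases List.mem_cons.mp hx with rfl | h
          · exact List.mem_cons_self
          · cases h)
      ⟨List.nodup_nil, by intro x hx; cases hx⟩)
    (fun x => x) false

-- ===== PRECONDITION & SPEC =====
def Spec_collect_component_nodes_excluding_scaffold_py (adjacency : List (Int × List (Int × Int))) (start_node : Int) (scaffold_set : List Int) (out : List Int) : Prop := out = collect_component_nodes_excluding_scaffold_py_alt adjacency start_node scaffold_set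
instance (adjacency : List (Int × List (Int × Int))) (start_node : Int) (scaffold_set : List Int) (out : List Int) : Decidable (Spec_collect_component_nodes_excluding_scaffold_py adjacency start_node scaffold_set out) := by unfold Spec_collect_component_nodes_excluding_scaffold_py; infer_instance

-- ===== CLAIM (what is proved, stated in full; the proofs are below) =====
def Claim_equal_collect_component_nodes_excluding_scaffold_py : Prop := ∀ (adjacency : List (Int × List (Int × Int))) (start_node : Int) (scaffold_set : List Int), Dom_collect_component_nodes_excluding_scaffold_py adjacency start_node scaffold_set → Spec_collect_component_nodes_excluding_scaffold_py adjacency start_node scaffold_set (collect_component_nodes_excluding_scaffold_py adjacency start_node scaffold_set)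

-- ===== LEMMAS AND PROOFS =====

-- nodes reachable from start through non-scaffold nodes only
inductive pvReach (adjacency : List (Int × List (Int × Int))) (scaffold_set : List Int) (start : Int) : Int → Prop
  | base : scaffold_set.contains start = false → pvReach adjacency scaffold_set start start
  | step {n m : Int} : pvReach adjacency scaffold_set start n → m ∈ pvNbrs adjacency n →
      scaffold_set.contains m = false → pvReach adjacency scaffold_set start m

theorem pvContainsMem (s : List Int) (x : Int) : PySem.Set.contains s x = true ↔ x ∈ s := by
  simp [PySem.Set.contains]

theorem pvReach_scaf (adjacency : List (Int × List (Int × Int))) (scaffold_set : List Int)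
    (start : Int) (h : scaffold_set.contains start = true) :
    ∀ x, ¬ pvReach adjacency scaffold_set start x := by
  intro x hx
  induction hx with
  | base hb => rw [h] at hb; cases hb
  | step _ _ _ ih => exact ih

-- the collected set only grows (A)
theorem pvA_mono (adjacency : List (Int × List (Int × Int))) (scaffold_set : List Int) (start : Int)
    (stack : List Int) (component : PySem.Set Int) (h1 : ∀ x ∈ stack, x ∈ pvUniv adjacency start)
    (h2 : component.Nodup ∧ ∀ x ∈ component, x ∈ pvUniv adjacency start) :
    ∀ x ∈ component, x ∈ pvDfsLoop adjacency scaffold_set start stack component h1 h2 := by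
  induction stack, component, h1, h2 using pvDfsLoop.induct adjacency scaffold_set start with
  | case1 component hcomp hstack _ =>
      rw [pvDfsLoop]
      exact fun x hx => hx
  | case2 component hcomp node rest hstack hc _ ih =>
      rw [pvDfsLoop]
      rw [if_pos hc]
      exact ih
  | case3 component hcomp node rest hstack hc _ ih =>
      rw [pvDfsLoop]
      rw [if_neg hc]
      intro x hx
      exact ih x ((PySem.Set.mem_add _ _ _).mpr (Or.inl hx))

-- the result of A is duplicate-free
theorem pvA_nodup (adjacency : List (Int × List (Int × Int))) (scaffold_set : List Int) (start : Int)
    (stack : List Int) (component : PySem.Set Int) (h1 : ∀ x ∈ stack, x ∈ pvUniv adjacency start)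
    (h2 : component.Nodup ∧ ∀ x ∈ component, x ∈ pvUniv adjacency start) :
    (pvDfsLoop adjacency scaffold_set start stack component h1 h2).Nodup := by
  induction stack, component, h1, h2 using pvDfsLoop.induct adjacency scaffold_set start with
  | case1 component hcomp hstack _ => rw [pvDfsLoop]; exact hcomp.1
  | case2 component hcomp node rest hstack hc _ ih => rw [pvDfsLoop]; rw [if_pos hc]; exact ih
  | case3 component hcomp node rest hstack hc _ ih => rw [pvDfsLoop]; rw [if_neg hc]; exact ih

-- everything A collects is reachable
theorem pvA_sound (adjacency : List (Int × List (Int × Int))) (scaffold_set : List Int) (start : Int)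
    (stack : List Int) (component : PySem.Set Int) (h1 : ∀ x ∈ stack, x ∈ pvUniv adjacency start)
    (h2 : component.Nodup ∧ ∀ x ∈ component, x ∈ pvUniv adjacency start) :
    (∀ x ∈ stack, pvReach adjacency scaffold_set start x) →
    (∀ x ∈ component, pvReach adjacency scaffold_set start x) →
    ∀ x ∈ pvDfsLoop adjacency scaffold_set start stack component h1 h2,
      pvReach adjacency scaffold_set start x := by
  induction stack, component, h1, h2 using pvDfsLoop.induct adjacency scaffold_set start with
  | case1 component hcomp hstack _ =>
      intro _ hc
      rw [pvDfsLoop]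
      exact hc
  | case2 component hcomp node rest hstack hc _ ih =>
      intro hsR hcR
      rw [pvDfsLoop]; rw [if_pos hc]
      exact ih (fun x hx => hsR x (List.mem_cons_of_mem _ hx)) hcR
  | case3 component hcomp node rest hstack hc _ ih =>
      intro hsR hcR
      rw [pvDfsLoop]; rw [if_neg hc]
      have hnodeR : pvReach adjacency scaffold_set start node := hsR node List.mem_cons_self
      apply ih
      · intro x hx
        rcases (pvMemFoldlCons _ _ _ _).mp hx with h | ⟨hnb, hp⟩
        · exact hsR x (List.mem_cons_of_mem _ h)
        · simp only [Bool.and_eq_true, Bool.not_eq_true'] at hp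
          exact pvReach.step hnodeR hnb hp.2
      · intro x hx
        rcases (PySem.Set.mem_add _ _ _).mp hx with h | rfl
        · exact hcR x h
        · exact hnodeR
-- everything reachable ends up in A's result (via partial closedness)
theorem pvA_complete (adjacency : List (Int × List (Int × Int))) (scaffold_set : List Int) (start : Int)
    (stack : List Int) (component : PySem.Set Int) (h1 : ∀ x ∈ stack, x ∈ pvUniv adjacency start)
    (h2 : component.Nodup ∧ ∀ x ∈ component, x ∈ pvUniv adjacency start) :
    (∀ n ∈ component, ∀ m ∈ pvNbrs adjacency n, scaffold_set.contains m = false →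
        m ∈ component ∨ m ∈ stack) →
    ((∀ n ∈ pvDfsLoop adjacency scaffold_set start stack component h1 h2,
        ∀ m ∈ pvNbrs adjacency n, scaffold_set.contains m = false →
          m ∈ pvDfsLoop adjacency scaffold_set start stack component h1 h2) ∧
     (∀ x ∈ stack, scaffold_set.contains x = false →
        x ∈ pvDfsLoop adjacency scaffold_set start stack component h1 h2)) := by
  induction stack, component, h1, h2 using pvDfsLoop.induct adjacency scaffold_set start with
  | case1 component hcomp hstack _ =>
      intro hinv
      rw [pvDfsLoop]
      refine ⟨?_, ?_⟩
      · intro n hn m hm hal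
        rcases hinv n hn m hm hal with h | h
        · exact h
        · cases h
      · intro x hx; cases hx
  | case2 component hcomp node rest hstack hc _ ih =>
      intro hinv
      rw [pvDfsLoop]; rw [if_pos hc]
      have hnode : scaffold_set.contains node = false → node ∈ component := by
        intro hal
        rw [hal] at hc
        simp only [Bool.or_false] at hc
        exact (pvContainsMem _ _).mp hc
      have hinv' : ∀ n ∈ component, ∀ m ∈ pvNbrs adjacency n,
          scaffold_set.contains m = false → m ∈ component ∨ m ∈ rest := by
        intro n hn m hm hal
        rcases hinv n hn m hm hal with h | h
        · exact Or.inl h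
        · rcases List.mem_cons.mp h with rfl | h
          · exact Or.inl (hnode hal)
          · exact Or.inr h
      rcases ih hinv' with ⟨hclosed, hstk⟩
      refine ⟨hclosed, ?_⟩
      intro x hx hal
      rcases List.mem_cons.mp hx with rfl | hx
      · exact pvA_mono _ _ _ _ _ _ _ x (hnode hal)
      · exact hstk x hx hal
  | case3 component hcomp node rest hstack hc _ ih =>
      intro hinv
      rw [pvDfsLoop]; rw [if_neg hc]
      have hinv' : ∀ n ∈ PySem.Set.add component node, ∀ m ∈ pvNbrs adjacency n,
          scaffold_set.contains m = false →
          m ∈ PySem.Set.add component node ∨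
          m ∈ (pvNbrs adjacency node).foldl
            (fun st m =>
              if !(PySem.Set.contains (PySem.Set.add component node) m) && !(scaffold_set.contains m)
              then m :: st else st) rest := by
        intro n hn m hm hal
        rcases (PySem.Set.mem_add _ _ _).mp hn with hn | heq
        · rcases hinv n hn m hm hal with h | h
          · exact Or.inl ((PySem.Set.mem_add _ _ _).mpr (Or.inl h))
          · rcases List.mem_cons.mp h with rfl | h
            · exact Or.inl ((PySem.Set.mem_add _ _ _).mpr (Or.inr rfl))
            · exact Or.inr ((pvMemFoldlCons _ _ _ _).mpr (Or.inl h))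
        · subst heq
          by_cases hmc : PySem.Set.contains (PySem.Set.add component n) m = true
          · exact Or.inl ((pvContainsMem _ _).mp hmc)
          · refine Or.inr ((pvMemFoldlCons _ _ _ _).mpr (Or.inr ⟨hm, ?_⟩))
            simp only [Bool.and_eq_true, Bool.not_eq_true']
            exact ⟨Bool.not_eq_true _ ▸ (Bool.eq_false_iff.mpr hmc), hal⟩
      rcases ih hinv' with ⟨hclosed, hstk⟩
      refine ⟨hclosed, ?_⟩
      intro x hx hal
      rcases List.mem_cons.mp hx with rfl | hx
      · exact pvA_mono _ _ _ _ _ _ _ x ((PySem.Set.mem_add _ _ _).mpr (Or.inr rfl))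
      · exact hstk x ((pvMemFoldlCons _ _ _ _).mpr (Or.inl hx)) hal

-- the collected set only grows (B)
theorem pvB_mono (adjacency : List (Int × List (Int × Int))) (scaffold_set : List Int) (start : Int)
    (frontier component : PySem.Set Int) (h1 : ∀ x ∈ frontier, x ∈ pvUniv adjacency start)
    (h2 : component.Nodup ∧ ∀ x ∈ component, x ∈ pvUniv adjacency start) :
    ∀ x ∈ component, x ∈ pvBfsLoop adjacency scaffold_set start frontier component h1 h2 := by
  induction frontier, component, h1, h2 using pvBfsLoop.induct adjacency scaffold_set start with
  | case1 component hcomp hfront =>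
      rw [pvBfsLoop]
      exact fun x hx => hx
  | case2 frontier component hfront hcomp hne ih =>
      rw [pvBfsLoop]
      rw [dif_neg hne]
      intro x hx
      exact ih x ((PySem.Set.mem_union _ _ _).mpr (Or.inl hx))

-- the result of B is duplicate-free
theorem pvB_nodup (adjacency : List (Int × List (Int × Int))) (scaffold_set : List Int) (start : Int)
    (frontier component : PySem.Set Int) (h1 : ∀ x ∈ frontier, x ∈ pvUniv adjacency start)
    (h2 : component.Nodup ∧ ∀ x ∈ component, x ∈ pvUniv adjacency start) :
    (pvBfsLoop adjacency scaffold_set start frontier component h1 h2).Nodup := by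
  induction frontier, component, h1, h2 using pvBfsLoop.induct adjacency scaffold_set start with
  | case1 component hcomp hfront => rw [pvBfsLoop]; exact hcomp.1
  | case2 frontier component hfront hcomp hne ih => rw [pvBfsLoop]; rw [dif_neg hne]; exact ih

-- everything B collects is reachable
theorem pvB_sound (adjacency : List (Int × List (Int × Int))) (scaffold_set : List Int) (start : Int)
    (frontier component : PySem.Set Int) (h1 : ∀ x ∈ frontier, x ∈ pvUniv adjacency start)
    (h2 : component.Nodup ∧ ∀ x ∈ component, x ∈ pvUniv adjacency start) :
    (∀ x ∈ frontier, scaffold_set.contains x = false → pvReach adjacency scaffold_set start x) →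
    (∀ x ∈ component, pvReach adjacency scaffold_set start x) →
    ∀ x ∈ pvBfsLoop adjacency scaffold_set start frontier component h1 h2,
      pvReach adjacency scaffold_set start x := by
  induction frontier, component, h1, h2 using pvBfsLoop.induct adjacency scaffold_set start with
  | case1 component hcomp hfront =>
      intro _ hc
      rw [pvBfsLoop]
      exact hc
  | case2 frontier component hfront hcomp hne ih =>
      intro hfR hcR
      rw [pvBfsLoop]; rw [dif_neg hne]
      have hfreshR : ∀ x ∈ PySem.Set.ofList (frontier.filter
          (fun n => !(scaffold_set.contains n) && !(PySem.Set.contains component n))),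
          pvReach adjacency scaffold_set start x := by
        intro x hx
        have hx' := (PySem.Set.mem_ofList _ _).mp hx
        have hp := List.of_mem_filter hx'
        simp only [Bool.and_eq_true, Bool.not_eq_true'] at hp
        exact hfR x (List.mem_of_mem_filter hx') hp.1
      apply ih
      · intro x hx hal
        rcases List.mem_flatMap.mp ((PySem.Set.mem_ofList _ _).mp hx) with ⟨node, hnode, hm⟩
        exact pvReach.step (hfreshR node ((PySem.Set.mem_ofList _ _).mpr hnode)) hm hal
      · intro x hx
        rcases (PySem.Set.mem_union _ _ _).mp hx with h | h
        · exact hcR x h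
        · exact hfreshR x h

-- everything reachable ends up in B's result (via partial closedness)
theorem pvB_complete (adjacency : List (Int × List (Int × Int))) (scaffold_set : List Int) (start : Int)
    (frontier component : PySem.Set Int) (h1 : ∀ x ∈ frontier, x ∈ pvUniv adjacency start)
    (h2 : component.Nodup ∧ ∀ x ∈ component, x ∈ pvUniv adjacency start) :
    (∀ n ∈ component, ∀ m ∈ pvNbrs adjacency n, scaffold_set.contains m = false →
        m ∈ component ∨ m ∈ frontier) →
    ((∀ n ∈ pvBfsLoop adjacency scaffold_set start frontier component h1 h2,
        ∀ m ∈ pvNbrs adjacency n, scaffold_set.contains m = false →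
          m ∈ pvBfsLoop adjacency scaffold_set start frontier component h1 h2) ∧
     (∀ x ∈ frontier, scaffold_set.contains x = false →
        x ∈ pvBfsLoop adjacency scaffold_set start frontier component h1 h2)) := by
  induction frontier, component, h1, h2 using pvBfsLoop.induct adjacency scaffold_set start with
  | case1 component hcomp hfront =>
      intro hinv
      rw [pvBfsLoop]
      refine ⟨?_, ?_⟩
      · intro n hn m hm hal
        rcases hinv n hn m hm hal with h | h
        · exact h
        · cases h
      · intro x hx; cases hx
  | case2 frontier component hfront hcomp hne ih =>
      intro hinv
      rw [pvBfsLoop]; rw [dif_neg hne]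
      have hfresh_comp : ∀ x ∈ frontier, scaffold_set.contains x = false →
          x ∈ PySem.Set.union component
            (PySem.Set.ofList (frontier.filter
              (fun n => !(scaffold_set.contains n) && !(PySem.Set.contains component n)))) := by
        intro x hx hal
        by_cases hxc : PySem.Set.contains component x = true
        · exact (PySem.Set.mem_union _ _ _).mpr (Or.inl ((pvContainsMem _ _).mp hxc))
        · refine (PySem.Set.mem_union _ _ _).mpr (Or.inr ((PySem.Set.mem_ofList _ _).mpr ?_))
          refine List.mem_filter.mpr ⟨hx, ?_⟩
          simp only [Bool.and_eq_true, Bool.not_eq_true']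
          exact ⟨hal, Bool.not_eq_true _ ▸ (Bool.eq_false_iff.mpr hxc)⟩
      have hinv' : ∀ n ∈ PySem.Set.union component
            (PySem.Set.ofList (frontier.filter
              (fun n => !(scaffold_set.contains n) && !(PySem.Set.contains component n)))),
          ∀ m ∈ pvNbrs adjacency n, scaffold_set.contains m = false →
          m ∈ PySem.Set.union component
            (PySem.Set.ofList (frontier.filter
              (fun n => !(scaffold_set.contains n) && !(PySem.Set.contains component n)))) ∨
          m ∈ PySem.Set.ofList
            ((frontier.filter
                (fun n => !(scaffold_set.contains n) && !(PySem.Set.contains component n))).flatMap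
              (fun node => pvNbrs adjacency node)) := by
        intro n hn m hm hal
        rcases (PySem.Set.mem_union _ _ _).mp hn with hn | hn
        · rcases hinv n hn m hm hal with h | h
          · exact Or.inl ((PySem.Set.mem_union _ _ _).mpr (Or.inl h))
          · exact Or.inl (hfresh_comp m h hal)
        · exact Or.inr ((PySem.Set.mem_ofList _ _).mpr
            (List.mem_flatMap.mpr ⟨n, (PySem.Set.mem_ofList _ _).mp hn, hm⟩))
      rcases ih hinv' with ⟨hclosed, _⟩
      refine ⟨hclosed, ?_⟩
      intro x hx hal
      exact pvB_mono _ _ _ _ _ _ _ x (hfresh_comp x hx hal)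

-- membership in A's final set is exactly reachability
theorem pvA_iff (adjacency : List (Int × List (Int × Int))) (scaffold_set : List Int) (start : Int)
    (hs : scaffold_set.contains start = false)
    (h1 : ∀ x ∈ [start], x ∈ pvUniv adjacency start)
    (h2 : (([] : List Int)).Nodup ∧ ∀ x ∈ ([] : List Int), x ∈ pvUniv adjacency start) :
    ∀ x, x ∈ pvDfsLoop adjacency scaffold_set start [start] [] h1 h2 ↔
      pvReach adjacency scaffold_set start x := by
  intro x
  constructor
  · exact fun hx => pvA_sound adjacency scaffold_set start [start] [] h1 h2
      (by intro y hy
          rcases List.mem_cons.mp hy with rfl | hy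
          · exact pvReach.base hs
          · cases hy)
      (by intro y hy; cases hy) x hx
  · intro hx
    rcases pvA_complete adjacency scaffold_set start [start] [] h1 h2
        (by intro n hn; cases hn) with ⟨hclosed, hstk⟩
    induction hx with
    | base _ => exact hstk start List.mem_cons_self hs
    | step _ hnb hal ih => exact hclosed _ ih _ hnb hal

-- membership in B's final set is exactly reachability (no start guard needed)
theorem pvB_iff (adjacency : List (Int × List (Int × Int))) (scaffold_set : List Int) (start : Int)
    (h1 : ∀ x ∈ [start], x ∈ pvUniv adjacency start)
    (h2 : (([] : List Int)).Nodup ∧ ∀ x ∈ ([] : List Int), x ∈ pvUniv adjacency start) :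
    ∀ x, x ∈ pvBfsLoop adjacency scaffold_set start [start] [] h1 h2 ↔
      pvReach adjacency scaffold_set start x := by
  intro x
  constructor
  · exact fun hx => pvB_sound adjacency scaffold_set start [start] [] h1 h2
      (by intro y hy hal
          rcases List.mem_cons.mp hy with rfl | hy
          · exact pvReach.base hal
          · cases hy)
      (by intro y hy; cases hy) x hx
  · intro hx
    rcases pvB_complete adjacency scaffold_set start [start] [] h1 h2
        (by intro n hn; cases hn) with ⟨hclosed, hfr⟩
    induction hx with
    | base hb => exact hfr start List.mem_cons_self hb
    | step _ hnb hal ih => exact hclosed _ ih _ hnb hal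

-- ===== VERDICT (by name: the statement is the Claim_ definition above) =====
theorem collect_component_nodes_excluding_scaffold_py_spec : Claim_equal_collect_component_nodes_excluding_scaffold_py := by
  intro adjacency start_node scaffold_set _
  unfold Spec_collect_component_nodes_excluding_scaffold_py
  unfold collect_component_nodes_excluding_scaffold_py
  unfold collect_component_nodes_excluding_scaffold_py_alt
  by_cases hs : scaffold_set.contains start_node = true
  · rw [if_pos hs]
    have hB : ∀ (h1 : ∀ x ∈ [start_node], x ∈ pvUniv adjacency start_node)
        (h2 : (([] : List Int)).Nodup ∧ ∀ x ∈ ([] : List Int), x ∈ pvUniv adjacency start_node),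
        pvBfsLoop adjacency scaffold_set start_node [start_node] [] h1 h2 = [] := by
      intro h1 h2
      rw [List.eq_nil_iff_forall_not_mem]
      intro x hx
      exact pvReach_scaf adjacency scaffold_set start_node hs x
        ((pvB_iff adjacency scaffold_set start_node h1 h2 x).mp hx)
    rw [hB]
    exact ((PySem.List.sorted_eq_nil_iff _ _ _).mpr rfl).symm
  · rw [if_neg hs]
    have hs' : scaffold_set.contains start_node = false := Bool.eq_false_iff.mpr hs
    apply PySem.List.sorted_eq_sorted_of_perm _ _ _ (fun a b h => h)
    rw [List.perm_ext_iff_of_nodup (pvA_nodup _ _ _ _ _ _ _) (pvB_nodup _ _ _ _ _ _ _)]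
    intro x
    rw [pvA_iff adjacency scaffold_set start_node hs' _ _ x,
      pvB_iff adjacency scaffold_set start_node _ _ x]
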